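-- pv_equiv track=rewrite | github.com/ZhangLab-DeepNeuroCogLab/CATDiet | eval_shape_bias.py | get_collectively_correct_indices
-- ===== SOURCE A (Python) =====
-- from typing import Dict, List, Tuple
--
-- def is_correct(pred: str, shape_label: str, texture_label: str) -> bool:
--     return pred == shape_label or pred == texture_label
--
-- def get_collectively_correct_indices(
--     labels: List[Tuple[str, str]],
--     preds_all: List[List[str]],
-- ) -> List[int]:
--     return [
--         i
--         for i, (shape_label, texture_label) in enumerate(labels)
--         if all(
--             is_correct(preds_all[m_i][i], shape_label, texture_label)
--             for m_i in range(len(preds_all))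
--         )
--     ]
-- ===== SOURCE B (Python) =====
-- def get_collectively_correct_indices(labels, preds_all):
--     n = len(labels)
--     common = set(range(n))
--     for preds in preds_all:
--         common &= {i for i in range(n)
--                    if preds[i] == labels[i][0] or preds[i] == labels[i][1]}
--     return sorted(common)
-- ===== Notes on version B (the rewrite author's own statement) =====
-- stated objective: alternative
-- what changed: Index-outer loop with a short-circuiting all() over models is replaced by a model-outer pass that builds each model's correct-index set and intersects them, starting from set(range(n)), then returns the sorted intersection.
-- outside the precondition, e.g. on get_collectively_correct_indices([('a', 'b')], [['x'], []]): A returns [], B raises IndexError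
import Mathlib
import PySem

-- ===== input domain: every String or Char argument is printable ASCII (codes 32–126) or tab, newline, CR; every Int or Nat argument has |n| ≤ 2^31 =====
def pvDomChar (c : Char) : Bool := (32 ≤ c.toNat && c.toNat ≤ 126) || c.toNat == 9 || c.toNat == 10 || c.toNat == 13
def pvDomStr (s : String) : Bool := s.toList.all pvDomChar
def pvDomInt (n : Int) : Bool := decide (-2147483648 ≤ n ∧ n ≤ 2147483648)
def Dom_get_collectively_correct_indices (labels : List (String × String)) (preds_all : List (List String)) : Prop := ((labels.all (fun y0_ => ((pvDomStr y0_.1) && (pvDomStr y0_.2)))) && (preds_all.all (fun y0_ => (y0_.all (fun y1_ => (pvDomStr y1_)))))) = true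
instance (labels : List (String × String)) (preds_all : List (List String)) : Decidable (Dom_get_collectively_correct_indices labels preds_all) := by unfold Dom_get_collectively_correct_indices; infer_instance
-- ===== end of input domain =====

-- B replaces the index-outer loop with short-circuiting all() by a model-outer pass intersecting per-model correct-index sets (alternative decomposition, same cost; return value only).


-- ===== PORT A =====
def is_correct (pred shape_label texture_label : String) : Bool :=
  pred == shape_label || pred == texture_label

def get_collectively_correct_indices (labels : List (String × String)) (preds_all : List (List String)) : List Int :=
  (PySem.List.enumerate labels).foldl
    (fun acc p =>
      if (PySem.List.pyRange 0 (preds_all.length) 1).all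
           (fun m_i => is_correct (PySem.List.pyGetD (PySem.List.pyGetD preds_all m_i []) p.1 "") p.2.1 p.2.2)
      then acc ++ [p.1] else acc) []

-- ===== PORT B =====
def get_collectively_correct_indices_alt (labels : List (String × String)) (preds_all : List (List String)) : List Int :=
  let n : Int := labels.length
  let common : PySem.Set Int := PySem.Set.ofList (PySem.List.pyRange 0 n 1)
  let common := preds_all.foldl
    (fun common preds =>
      PySem.Set.inter common
        (PySem.Set.ofList ((PySem.List.pyRange 0 n 1).filter (fun i =>
          PySem.List.pyGetD preds i "" == (PySem.List.pyGetD labels i ("", "")).1 ||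
          PySem.List.pyGetD preds i "" == (PySem.List.pyGetD labels i ("", "")).2))))
    common
  PySem.List.sorted common (fun x => x) false

-- ===== PRECONDITION & SPEC =====
-- Pre_ excludes inputs where some model's prediction list is shorter than labels: there Python A
-- either raises IndexError, or returns only because a mismatch short-circuits all() before the
-- missing index — a corner B's model-outer pass does not reach the same way (B raises there).
def Pre_get_collectively_correct_indices (labels : List (String × String)) (preds_all : List (List String)) : Prop :=
  ∀ preds ∈ preds_all, labels.length ≤ preds.length
instance (labels : List (String × String)) (preds_all : List (List String)) : Decidable (Pre_get_collectively_correct_indices labels preds_all) := by unfold Pre_get_collectively_correct_indices; infer_instance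

def pvWitness_get_collectively_correct_indices : (List (String × String)) × List (List String) :=
  ([("a", "b"), ("c", "d")], [["a", "d"], ["b", "c"]])

def Spec_get_collectively_correct_indices (labels : List (String × String)) (preds_all : List (List String)) (out : List Int) : Prop := out = get_collectively_correct_indices_alt labels preds_all
instance (labels : List (String × String)) (preds_all : List (List String)) (out : List Int) : Decidable (Spec_get_collectively_correct_indices labels preds_all out) := by unfold Spec_get_collectively_correct_indices; infer_instance

-- ===== CLAIM (what is proved, stated in full; the proofs are below) =====
def Claim_equal_get_collectively_correct_indices : Prop := ∀ (labels : List (String × String)) (preds_all : List (List String)), Dom_get_collectively_correct_indices labels preds_all → Pre_get_collectively_correct_indices labels preds_all → Spec_get_collectively_correct_indices labels preds_all (get_collectively_correct_indices labels preds_all)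

-- ===== LEMMAS AND PROOFS =====

-- intersecting a filtered range with a per-model correct set is one more filter
lemma inter_filter_step (R : List Int) (q p : Int → Bool) :
    PySem.Set.inter (R.filter q) (PySem.Set.ofList (R.filter p)) =
      R.filter (fun i => q i && p i) := by
  unfold PySem.Set.inter
  rw [List.filter_filter]
  apply List.filter_congr
  intro i hi
  have hc : (PySem.Set.ofList (R.filter p)).contains i = (p i) := by
    by_cases h : p i = true
    · simp [PySem.Set.mem_ofList, List.mem_filter, hi, h]
    · simp only [Bool.not_eq_true] at h
      simp only [PySem.Set.contains_eq_listContains, h]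
      simp [PySem.Set.mem_ofList, List.mem_filter, h]
  rw [hc, Bool.and_comm]

-- B's fold accumulates the conjunction of the per-model filters
lemma foldl_inter_filter {β : Type} (R : List Int) (P : β → Int → Bool)
    (l : List β) (q : Int → Bool) :
    l.foldl
      (fun common preds =>
        PySem.Set.inter common (PySem.Set.ofList (R.filter (P preds))))
      (R.filter q)
      = R.filter (fun i => q i && l.all (fun preds => P preds i)) := by
  induction l generalizing q with
  | nil => simp
  | cons preds rest ih =>
    simp only [List.foldl_cons, inter_filter_step]
    rw [ih]
    apply List.filter_congr
    intro i _
    simp [Bool.and_assoc]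

theorem get_collectively_correct_indices_spec : Claim_equal_get_collectively_correct_indices := by
  intro labels preds_all _ hpre
  unfold Spec_get_collectively_correct_indices
  unfold get_collectively_correct_indices get_collectively_correct_indices_alt
  rw [PySem.List.foldl_append_if, List.nil_append]
  rw [PySem.List.enumerate_eq_map_pyRange labels ("", "")]
  rw [List.filter_map, List.map_map]
  have hmap : ((fun p : Int × (String × String) => p.1) ∘ fun j => (j, PySem.List.pyGetD labels j ("", ""))) = id := rfl
  rw [hmap, List.map_id]
  -- fold B's loop into a single filter
  have hR : PySem.Set.ofList (PySem.List.pyRange 0 (labels.length : Int) 1) =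
      (PySem.List.pyRange 0 (labels.length : Int) 1).filter (fun _ => true) := by
    rw [PySem.Set.ofList_eq_self_of_nodup _ (PySem.List.nodup_pyRange_one _ _), List.filter_true]
  simp only [PySem.List.len] at *
  rw [hR]
  rw [foldl_inter_filter (PySem.List.pyRange 0 (labels.length : Int) 1)
      (fun preds i =>
        PySem.List.pyGetD preds i "" == (PySem.List.pyGetD labels i ("", "")).1 ||
        PySem.List.pyGetD preds i "" == (PySem.List.pyGetD labels i ("", "")).2)
      preds_all (fun _ => true)]
  -- sorted of an increasing list is itself
  rw [PySem.List.sorted_eq_self_of_pairwise _ _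
      (((PySem.List.pairwise_lt_pyRange_one 0 (labels.length : Int)).filter _).imp (fun h => le_of_lt h))]
  -- the two filters agree pointwise on the range
  apply List.filter_congr
  intro i hi
  rw [PySem.List.mem_pyRange_one] at hi
  simp only [Bool.true_and, Function.comp_apply]
  -- turn A's range-over-models all() into B's all over preds_all
  have : (PySem.List.pyRange 0 (preds_all.length : Int) 1).all
      (fun m_i => is_correct (PySem.List.pyGetD (PySem.List.pyGetD preds_all m_i []) i "")
        (PySem.List.pyGetD labels i ("", "")).1 (PySem.List.pyGetD labels i ("", "")).2)
      = preds_all.all (fun preds => is_correct (PySem.List.pyGetD preds i "")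
        (PySem.List.pyGetD labels i ("", "")).1 (PySem.List.pyGetD labels i ("", "")).2) := by
    conv_rhs => rw [← PySem.List.map_pyGetD_pyRange_zero preds_all []]
    rw [List.all_map]
    rfl
  rw [this]
  rfl

-- ===== VERDICT (by name: the statement is the Claim_ definition above) =====
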